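-- pv_equiv track=rewrite | github.com/bestainan/GameLogServer | apps/logs/daily_log_dat.py | split_log_users_last_gold
-- ===== SOURCE A (Python) =====
-- def split_log_users_last_gold(log_lst):
--     """
--         获取玩家最后的金币数值
--         {
--             _uid: gold 玩家最后登录时候的金币
--         }
--     """
--     user_gold_dict = dict()
--     user_time_dict = dict()
--     for _log in log_lst:
--         _uid = _log['uid']
--         if 'cur_gold' in _log:
--             _cur = _log['cur_gold']
--             _time = _log['log_time']
--             if _uid not in user_time_dict or _time > user_time_dict[_uid]:
--                 user_time_dict[_uid] = _time
--                 user_gold_dict[_uid] = _cur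
--     return user_gold_dict
-- ===== SOURCE B (Python) =====
-- def split_log_users_last_gold(log_lst):
--     """Group-then-reduce: bucket each uid's (log_time, cur_gold) pairs, then take max by time."""
--     groups = dict()
--     for _log in log_lst:
--         _uid = _log['uid']
--         if 'cur_gold' in _log:
--             groups.setdefault(_uid, []).append((_log['log_time'], _log['cur_gold']))
--     result = dict()
--     for _uid, pairs in groups.items():
--         result[_uid] = max(pairs, key=lambda p: p[0])[1]
--     return result
-- ===== Notes on version B (the rewrite author's own statement) =====
-- stated objective: alternative
-- what changed: Replaced A's single interleaved pass maintaining parallel gold/time dicts with a group-then-reduce shape: one pass buckets each uid's (log_time, cur_gold) pairs, a second pass picks the max-by-time pair per uid.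
import Mathlib
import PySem

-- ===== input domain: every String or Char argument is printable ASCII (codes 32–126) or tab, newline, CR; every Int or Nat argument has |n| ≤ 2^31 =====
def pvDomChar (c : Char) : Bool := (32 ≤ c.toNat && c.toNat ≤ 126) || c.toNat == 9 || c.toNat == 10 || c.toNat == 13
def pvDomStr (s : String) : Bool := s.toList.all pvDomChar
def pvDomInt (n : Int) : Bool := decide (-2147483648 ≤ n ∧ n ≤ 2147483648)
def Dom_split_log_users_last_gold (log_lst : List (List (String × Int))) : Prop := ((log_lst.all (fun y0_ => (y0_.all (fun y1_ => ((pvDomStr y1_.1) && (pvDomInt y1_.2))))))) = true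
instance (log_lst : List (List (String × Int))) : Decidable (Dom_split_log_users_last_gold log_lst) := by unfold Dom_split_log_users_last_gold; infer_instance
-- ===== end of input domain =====

-- B replaces A's single interleaved pass (parallel gold/time dicts) by a group-then-reduce
-- decomposition: bucket each uid's (log_time, cur_gold) pairs, then take the max-by-time pair.

-- ===== PORT A =====
-- each Python dict log is a List (String × Int); _log['k'] = (PySem.Dict.mk _log).get? "k"
def split_log_users_last_gold (log_lst : List (List (String × Int))) : List (Int × Int) :=
  (log_lst.foldl
    (fun (st : PySem.Dict Int Int × PySem.Dict Int Int) _log =>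
      match (PySem.Dict.mk _log).get? "uid" with
      | none => st        -- Python raises KeyError here; excluded by Pre_
      | some _uid =>
        if (PySem.Dict.mk _log).contains "cur_gold" then
          match (PySem.Dict.mk _log).get? "cur_gold", (PySem.Dict.mk _log).get? "log_time" with
          | some _cur, some _time =>
            -- '_uid not in user_time_dict or _time > user_time_dict[_uid]'
            if !st.2.contains _uid || decide (st.2.getD _uid 0 < _time) then
              (st.1.insert _uid _cur, st.2.insert _uid _time)
            else st
          | _, _ => st    -- KeyError on 'log_time'; excluded by Pre_
        else st)
    (PySem.Dict.empty, PySem.Dict.empty)).1.items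

-- ===== PORT B =====
def split_log_users_last_gold_alt (log_lst : List (List (String × Int))) : List (Int × Int) :=
  let groups : PySem.Dict Int (List (Int × Int)) :=
    log_lst.foldl
      (fun groups _log =>
        -- _uid = _log['uid']; if 'cur_gold' in _log: groups.setdefault(_uid, []).append((log_time, cur_gold))
        -- (the .elim none-branches are where Python raises KeyError; those inputs are excluded by Pre_)
        ((PySem.Dict.mk _log).get? "uid").elim groups (fun _uid =>
          if (PySem.Dict.mk _log).contains "cur_gold" then
            ((PySem.Dict.mk _log).get? "log_time").elim groups (fun _t =>
              ((PySem.Dict.mk _log).get? "cur_gold").elim groups (fun _c =>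
                groups.modify _uid [] (· ++ [(_t, _c)])))
          else groups))
      PySem.Dict.empty
  -- result[_uid] = max(pairs, key=lambda p: p[0])[1]   (pairs is never empty, so max cannot raise)
  (groups.items.foldl
    (fun (res : PySem.Dict Int Int) p =>
      res.insert p.1 ((PySem.List.max? p.2 (fun q => q.1)).getD (0, 0)).2)
    PySem.Dict.empty).items

-- ===== PRECONDITION & SPEC =====
-- Pre_ = exactly the inputs where A returns: every log has a 'uid' key, and every log
-- containing 'cur_gold' also has 'log_time' (otherwise Python raises KeyError).
def Pre_split_log_users_last_gold (log_lst : List (List (String × Int))) : Prop :=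
  ∀ _log ∈ log_lst, (PySem.Dict.mk _log).contains "uid" = true ∧
    ((PySem.Dict.mk _log).contains "cur_gold" = true → (PySem.Dict.mk _log).contains "log_time" = true)
instance (log_lst : List (List (String × Int))) : Decidable (Pre_split_log_users_last_gold log_lst) := by
  unfold Pre_split_log_users_last_gold; infer_instance
def pvWitness_split_log_users_last_gold : (List (List (String × Int))) :=
  [[("uid", 1), ("cur_gold", 5), ("log_time", 3)], [("uid", 1), ("cur_gold", 7), ("log_time", 9)]]

def Spec_split_log_users_last_gold (log_lst : List (List (String × Int))) (out : List (Int × Int)) : Prop := out = split_log_users_last_gold_alt log_lst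
instance (log_lst : List (List (String × Int))) (out : List (Int × Int)) : Decidable (Spec_split_log_users_last_gold log_lst out) := by unfold Spec_split_log_users_last_gold; infer_instance

-- ===== CLAIM (what is proved, stated in full; the proofs are below) =====
def Claim_equal_split_log_users_last_gold : Prop := ∀ (log_lst : List (List (String × Int))), Dom_split_log_users_last_gold log_lst → Pre_split_log_users_last_gold log_lst → Spec_split_log_users_last_gold log_lst (split_log_users_last_gold log_lst)

-- ===== LEMMAS AND PROOFS =====

-- extraction of a good log (one that both ports actually use): (uid, log_time, cur_gold)
def pvGood (log : List (String × Int)) : Bool :=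
  (PySem.Dict.mk log).contains "uid" && (PySem.Dict.mk log).contains "cur_gold"

def pvExt (log : List (String × Int)) : Int × Int × Int :=
  (((PySem.Dict.mk log).get? "uid").getD 0,
   ((PySem.Dict.mk log).get? "log_time").getD 0,
   ((PySem.Dict.mk log).get? "cur_gold").getD 0)

def pvF (log_lst : List (List (String × Int))) : List (Int × Int × Int) :=
  (log_lst.filter pvGood).map pvExt

def pvStepA (st : PySem.Dict Int Int × PySem.Dict Int Int) (x : Int × Int × Int) :
    PySem.Dict Int Int × PySem.Dict Int Int :=
  if !st.2.contains x.1 || decide (st.2.getD x.1 0 < x.2.1) then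
    (st.1.insert x.1 x.2.2, st.2.insert x.1 x.2.1)
  else st

def pvGroups (F : List (Int × Int × Int)) : PySem.Dict Int (List (Int × Int)) :=
  F.foldl (fun d x => d.modify x.1 [] (· ++ [(x.2.1, x.2.2)])) PySem.Dict.empty

def pvBest (l : List (Int × Int)) : Int × Int := (PySem.List.max? l (fun q => q.1)).getD (0, 0)

lemma pv_phaseA (log_lst : List (List (String × Int)))
    (h : Pre_split_log_users_last_gold log_lst) :
    split_log_users_last_gold log_lst
      = ((pvF log_lst).foldl pvStepA (PySem.Dict.empty, PySem.Dict.empty)).1.items := by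
  unfold split_log_users_last_gold pvF
  rw [List.foldl_map, List.foldl_filter]
  refine congrArg (fun st : PySem.Dict Int Int × PySem.Dict Int Int => st.1.items)
    (PySem.List.foldl_congr_mem _ _ _ _ ?_)
  intro st log hmem
  obtain ⟨hu, hct⟩ := h log hmem
  obtain ⟨u, hu'⟩ : ∃ u, (PySem.Dict.mk log).get? "uid" = some u :=
    Option.isSome_iff_exists.mp (by rw [← PySem.Dict.contains_eq_isSome_get?]; exact hu)
  by_cases hg : (PySem.Dict.mk log).contains "cur_gold" = true
  · obtain ⟨c, hc'⟩ : ∃ c, (PySem.Dict.mk log).get? "cur_gold" = some c :=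
      Option.isSome_iff_exists.mp (by rw [← PySem.Dict.contains_eq_isSome_get?]; exact hg)
    obtain ⟨t, ht'⟩ : ∃ t, (PySem.Dict.mk log).get? "log_time" = some t :=
      Option.isSome_iff_exists.mp (by rw [← PySem.Dict.contains_eq_isSome_get?]; exact (hct hg))
    simp [hu', hg, hc', ht', pvGood, pvExt, pvStepA, hu]
  · simp [hu', hg, pvGood]

lemma pv_phaseB (log_lst : List (List (String × Int)))
    (h : Pre_split_log_users_last_gold log_lst) :
    split_log_users_last_gold_alt log_lst
      = ((pvGroups (pvF log_lst)).items.foldl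
          (fun (res : PySem.Dict Int Int) p => res.insert p.1 (pvBest p.2).2)
          PySem.Dict.empty).items := by
  unfold split_log_users_last_gold_alt pvGroups pvF
  rw [List.foldl_map, List.foldl_filter]
  refine congrArg (fun G : PySem.Dict Int (List (Int × Int)) =>
      (G.items.foldl (fun (res : PySem.Dict Int Int) p =>
        res.insert p.1 ((PySem.List.max? p.2 (fun q => q.1)).getD (0, 0)).2) PySem.Dict.empty).items)
    (PySem.List.foldl_congr_mem _ _ _ _ ?_)
  intro d log hmem
  obtain ⟨hu, hct⟩ := h log hmem
  obtain ⟨u, hu'⟩ : ∃ u, (PySem.Dict.mk log).get? "uid" = some u :=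
    Option.isSome_iff_exists.mp (by rw [← PySem.Dict.contains_eq_isSome_get?]; exact hu)
  by_cases hg : (PySem.Dict.mk log).contains "cur_gold" = true
  · obtain ⟨c, hc'⟩ : ∃ c, (PySem.Dict.mk log).get? "cur_gold" = some c :=
      Option.isSome_iff_exists.mp (by rw [← PySem.Dict.contains_eq_isSome_get?]; exact hg)
    obtain ⟨t, ht'⟩ : ∃ t, (PySem.Dict.mk log).get? "log_time" = some t :=
      Option.isSome_iff_exists.mp (by rw [← PySem.Dict.contains_eq_isSome_get?]; exact (hct hg))
    simp [hu', hg, hc', ht', pvGood, pvExt, hu]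
  · simp [hu', hg, pvGood]

lemma pvGroups_keys_nodup (F : List (Int × Int × Int)) : (pvGroups F).keys.Nodup := by
  exact PySem.Dict.nodup_keys_foldl_modify_key F (fun x => x.1) [] (fun _ x l => l ++ [(x.2.1, x.2.2)])
    PySem.Dict.empty (by simp)

lemma pvGroups_vals_ne_nil (F : List (Int × Int × Int)) :
    ∀ p ∈ (pvGroups F).items, p.2 ≠ [] := by
  have aux : ∀ (F : List (Int × Int × Int)) (d : PySem.Dict Int (List (Int × Int))),
      (∀ p ∈ d.items, p.2 ≠ []) →
      ∀ p ∈ (F.foldl (fun d x => d.modify x.1 [] (· ++ [(x.2.1, x.2.2)])) d).items, p.2 ≠ [] := by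
    intro F
    induction F with
    | nil => intro d hd; exact hd
    | cons x F ih =>
      intro d hd
      simp only [List.foldl_cons]
      refine ih _ ?_
      intro p hp
      rw [PySem.Dict.modify] at hp
      rcases (PySem.Dict.mem_items_insert _ _ _ _).mp hp with h1 | h2
      · subst h1; simp
      · exact hd p h2.1
  exact aux F PySem.Dict.empty (by intro p hp; simp [PySem.Dict.empty] at hp)

lemma pv_max?_cons : ∀ (xs : List (Int × Int)) (a : Int × Int),
    ∃ m, PySem.List.max? (a :: xs) (fun q => q.1) = some m := by
  intro xs
  induction xs with
  | nil => intro a; exact ⟨a, rfl⟩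
  | cons x xs ih =>
    intro a
    have h : PySem.List.max? (a :: x :: xs) (fun q => q.1)
        = PySem.List.max? ((if a.1 < x.1 then x else a) :: xs) (fun q => q.1) := by
      by_cases hax : a.1 < x.1 <;> simp [PySem.List.max?, hax]
    rw [h]; exact ih _

lemma pv_max?_isSome {l : List (Int × Int)} (h : l ≠ []) :
    (PySem.List.max? l (fun q => q.1)).isSome := by
  cases l with
  | nil => exact absurd rfl h
  | cons x xs =>
    obtain ⟨m, hm⟩ := pv_max?_cons xs x
    simp [hm]

lemma pvBest_append (l : List (Int × Int)) (x : Int × Int) (hl : l ≠ []) :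
    pvBest (l ++ [x]) = if (pvBest l).1 < x.1 then x else pvBest l := by
  obtain ⟨m, hm⟩ := Option.isSome_iff_exists.mp (pv_max?_isSome hl)
  have h2 : PySem.List.max? (l ++ [x]) (fun q => q.1)
      = if m.1 < x.1 then some x else some m := by
    unfold PySem.List.max? at hm ⊢
    rw [List.foldl_append, hm, List.foldl_cons, List.foldl_nil]
  have hb : pvBest l = m := by simp [pvBest, hm]
  rw [pvBest, h2, hb]
  by_cases hmx : m.1 < x.1 <;> simp [hmx]

lemma pv_mk_map_contains {β : Type} (I : List (Int × List (Int × Int))) (g : Int × List (Int × Int) → β) (k : Int) :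
    (PySem.Dict.mk (I.map (fun p => (p.1, g p)))).contains k = (PySem.Dict.mk I).contains k := by
  simp [PySem.Dict.contains, List.any_map, Function.comp_def]

lemma pv_mk_map_get? {β : Type} (I : List (Int × List (Int × Int))) (f : List (Int × Int) → β) (k : Int) :
    (PySem.Dict.mk (I.map (fun p => (p.1, f p.2)))).get? k = ((PySem.Dict.mk I).get? k).map f := by
  induction I with
  | nil => simp [PySem.Dict.get?]
  | cons p rest ih =>
    obtain ⟨a, b⟩ := p
    simp only [List.map_cons, PySem.Dict.get?_mk_cons]
    by_cases hak : a == k <;> simp [hak, ih]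

lemma pv_main (F : List (Int × Int × Int)) :
    F.foldl pvStepA (PySem.Dict.empty, PySem.Dict.empty)
      = (PySem.Dict.mk ((pvGroups F).items.map (fun p => (p.1, (pvBest p.2).2))),
         PySem.Dict.mk ((pvGroups F).items.map (fun p => (p.1, (pvBest p.2).1)))) := by
  induction F using List.reverseRecOn with
  | nil => rfl
  | append_singleton F x ih =>
    obtain ⟨u, t, c⟩ := x
    rw [List.foldl_append, List.foldl_cons, List.foldl_nil, ih]
    have hGrp : pvGroups (F ++ [(u, t, c)])
        = (pvGroups F).insert u ((pvGroups F).getD u [] ++ [(t, c)]) := by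
      simp [pvGroups, List.foldl_append, PySem.Dict.modify]
    rw [hGrp]
    by_cases hc : (pvGroups F).contains u = true
    · -- uid already grouped
      obtain ⟨l₀, hg⟩ : ∃ l₀, (pvGroups F).get? u = some l₀ :=
        Option.isSome_iff_exists.mp (by rw [← PySem.Dict.contains_eq_isSome_get?]; exact hc)
      have hgetD : (pvGroups F).getD u [] = l₀ := by simp [PySem.Dict.getD, hg]
      have hmemI : (u, l₀) ∈ (pvGroups F).items :=
        (PySem.Dict.get?_eq_some_iff_mem_items _ _ _ (pvGroups_keys_nodup F)).mp hg
      have hl₀ : l₀ ≠ [] := pvGroups_vals_ne_nil F _ hmemI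
      rw [hgetD, PySem.Dict.items_insert_of_contains _ _ hc]
      have hcT : (PySem.Dict.mk ((pvGroups F).items.map (fun p => (p.1, (pvBest p.2).1)))).contains u = true := by
        rw [pv_mk_map_contains]; exact hc
      have hgT : (PySem.Dict.mk ((pvGroups F).items.map (fun p => (p.1, (pvBest p.2).1)))).getD u 0
          = (pvBest l₀).1 := by
        rw [PySem.Dict.getD, pv_mk_map_get? (pvGroups F).items (fun l => (pvBest l).1) u, hg]
        rfl
      unfold pvStepA
      simp only [hcT, hgT, Bool.not_true, Bool.false_or]
      by_cases ht : (pvBest l₀).1 < t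
      · have hba : pvBest (l₀ ++ [(t, c)]) = (t, c) := by
          rw [pvBest_append _ _ hl₀, if_pos ht]
        simp only [ht, decide_true, if_true]
        refine Prod.ext ?_ ?_ <;> apply PySem.Dict.ext <;>
          · rw [PySem.Dict.items_insert_of_contains _ _ (by rw [pv_mk_map_contains]; exact hc)]
            simp only [List.map_map]
            refine List.map_congr_left ?_
            intro p _
            by_cases hpu : p.1 = u <;> simp [hpu, hba]
      · have hba : pvBest (l₀ ++ [(t, c)]) = pvBest l₀ := by
          rw [pvBest_append _ _ hl₀, if_neg ht]
        have hkeyinj : ∀ p ∈ (pvGroups F).items, p.1 = u → p = (u, l₀) := by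
          intro p hp hpu
          exact List.inj_on_of_nodup_map (pvGroups_keys_nodup F) hp hmemI hpu
        simp only [ht, decide_false]
        refine Prod.ext ?_ ?_ <;> apply PySem.Dict.ext <;>
          · simp only [List.map_map]
            refine List.map_congr_left ?_
            intro p hp
            by_cases hpu : p.1 = u
            · have hpl : p = (u, l₀) := hkeyinj p hp hpu
              subst hpl
              simp [hba]
            · simp [hpu]
    · -- new uid
      have hc' : (pvGroups F).contains u = false := by
        exact Bool.not_eq_true _ ▸ eq_false_of_ne_true hc
      rw [PySem.Dict.getD_of_not_contains _ _ hc', PySem.Dict.items_insert_of_not_contains _ _ hc']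
      have hcT : (PySem.Dict.mk ((pvGroups F).items.map (fun p => (p.1, (pvBest p.2).1)))).contains u = false := by
        rw [pv_mk_map_contains]; exact hc'
      unfold pvStepA
      simp only [hcT, Bool.not_false, Bool.true_or, if_true]
      have hbest : pvBest [(t, c)] = (t, c) := rfl
      refine Prod.ext ?_ ?_ <;> apply PySem.Dict.ext <;>
        · rw [PySem.Dict.items_insert_of_not_contains _ _ (by rw [pv_mk_map_contains]; exact hc')]
          simp [hbest]

-- ===== VERDICT (by name: the statement is the Claim_ definition above) =====
theorem split_log_users_last_gold_spec : Claim_equal_split_log_users_last_gold := by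
  intro log_lst _hd hpre
  unfold Spec_split_log_users_last_gold
  rw [pv_phaseA log_lst hpre, pv_phaseB log_lst hpre, pv_main (pvF log_lst)]
  rw [PySem.Dict.items_foldl_insert_fresh (pvGroups (pvF log_lst)).items (fun p => p.1)
        (fun p => (pvBest p.2).2) PySem.Dict.empty
        (by intro a _; simp [PySem.Dict.contains_empty])
        (pvGroups_keys_nodup (pvF log_lst))]
  rfl
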